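-- pv_equiv track=rewrite | github.com/Celian-Butre/PyGames-NSI-Misc | NSI/Mini-projet_le Yam's/Célian_yams.py | estBrelan
-- ===== SOURCE A (Python) =====
-- def estBrelan(listedeDes):
--     Brelan = False
--     for i in range(1,7):
--         totaldeceDes = 0
--         for j in range (5):
--             if listedeDes[j] == i:
--                 totaldeceDes += 1
--                 if totaldeceDes == 3:
--                     Brelan = True
--     return (Brelan)
-- ===== SOURCE B (Python) =====
-- def estBrelan(listedeDes):
--     counts = {}
--     for j in range(5):
--         v = listedeDes[j]
--         counts[v] = counts.get(v, 0) + 1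
--     return any(counts.get(i, 0) >= 3 for i in range(1, 7))
-- ===== Notes on version B (the rewrite author's own statement) =====
-- stated objective: idiomatic
-- what changed: Replaces the 6-way repeated scan (for each face 1..6, rescan the five dice counting matches) with one counting pass building a frequency dictionary over the first five dice, then a single lookup 'count >= 3' for each of the six faces.
import Mathlib
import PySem

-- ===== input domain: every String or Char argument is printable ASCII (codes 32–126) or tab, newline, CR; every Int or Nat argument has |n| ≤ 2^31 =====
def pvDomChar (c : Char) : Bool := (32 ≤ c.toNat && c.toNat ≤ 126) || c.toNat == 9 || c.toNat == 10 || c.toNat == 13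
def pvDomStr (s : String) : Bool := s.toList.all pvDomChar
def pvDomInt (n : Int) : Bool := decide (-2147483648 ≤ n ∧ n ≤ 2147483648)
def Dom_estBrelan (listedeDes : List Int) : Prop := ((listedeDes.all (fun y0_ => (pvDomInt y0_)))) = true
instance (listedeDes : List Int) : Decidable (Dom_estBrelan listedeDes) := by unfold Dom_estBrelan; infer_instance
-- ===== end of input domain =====

-- B replaces A's six repeated scans of the dice with one counting pass (a frequency
-- dictionary over the first five dice) followed by a lookup for each face 1..6 (idiomatic).


-- ===== PORT A =====
-- literal transliteration of A: for i in range(1,7): rescan the five dice counting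
-- matches of i, setting Brelan when the running total hits 3.
-- (pyGet? = none, i.e. Python's IndexError on a short list, is excluded by Pre_;
--  the .getD 0 fallback is never taken inside Pre_.)
def estBrelan (listedeDes : List Int) : Bool :=
  (PySem.List.pyRange 1 7 1).foldl
    (fun (Brelan : Bool) i =>
      ((PySem.List.pyRange 0 5 1).foldl
        (fun (st : Int × Bool) j =>
          if (PySem.List.pyGet? listedeDes j).getD 0 == i then
            (st.1 + 1, if st.1 + 1 == 3 then true else st.2)
          else st)
        (0, Brelan)).2)
    false

-- ===== PORT B =====
-- literal transliteration of B: one counting pass over the first five dice into a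
-- dict, then any(counts.get(i,0) >= 3 for i in range(1,7)).
def estBrelan_alt (listedeDes : List Int) : Bool :=
  let counts : PySem.Dict Int Int :=
    (PySem.List.pyRange 0 5 1).foldl
      (fun (d : PySem.Dict Int Int) j =>
        let v := (PySem.List.pyGet? listedeDes j).getD 0
        d.insert v (d.getD v 0 + 1))
      PySem.Dict.empty
  (PySem.List.pyRange 1 7 1).any (fun i => decide (3 ≤ counts.getD i 0))

-- ===== PRECONDITION & SPEC =====
-- Pre_ excludes exactly the lists with fewer than 5 elements, on which both A and B
-- raise IndexError (listedeDes[j] for j in range(5)).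
def Pre_estBrelan (listedeDes : List Int) : Prop := 5 ≤ listedeDes.length
instance (listedeDes : List Int) : Decidable (Pre_estBrelan listedeDes) := by unfold Pre_estBrelan; infer_instance
def pvWitness_estBrelan : List Int := [3, 3, 1, 3, 5]

def Spec_estBrelan (listedeDes : List Int) (out : Bool) : Prop := out = estBrelan_alt listedeDes
instance (listedeDes : List Int) (out : Bool) : Decidable (Spec_estBrelan listedeDes out) := by unfold Spec_estBrelan; infer_instance

-- ===== CLAIM (what is proved, stated in full; the proofs are below) =====
def Claim_equal_estBrelan : Prop := ∀ (listedeDes : List Int), Dom_estBrelan listedeDes → Pre_estBrelan listedeDes → Spec_estBrelan listedeDes (estBrelan listedeDes)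

-- ===== LEMMAS AND PROOFS =====

-- A's inner scan: folding the dice list counts matches of i; the flag ends up set
-- iff it was set before or the running total passes through 3.
theorem inner_scan (i : Int) (xs : List Int) (t : Int) (br : Bool) :
    (xs.foldl
      (fun (st : Int × Bool) x =>
        if x == i then (st.1 + 1, if st.1 + 1 == 3 then true else st.2) else st)
      (t, br)).2
    = (br || decide (t < 3 ∧ 3 ≤ t + (xs.count i : Int))) := by
  induction xs generalizing t br with
  | nil => simp
  | cons x xs ih =>
    by_cases hx : x == i
    · simp only [List.foldl_cons, ih, List.count_cons, hx, if_true]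
      cases br
      · simp only [Bool.false_or]
        by_cases h3 : t + 1 = 3
        · have ht : t = 2 := by omega
          subst ht
          simp
          omega
        · have h3' : (t + 1 == 3) = false := by simpa using h3
          simp only [h3', Bool.false_eq_true, if_false, Bool.false_or,
            decide_eq_decide]
          push_cast
          omega
      · simp
    · simp only [List.foldl_cons, ih, List.count_cons, hx,
        Bool.false_eq_true, if_false, add_zero]

-- folding "or" over a list is List.any
theorem foldl_or_any (p : Int → Bool) (xs : List Int) (br : Bool) :
    xs.foldl (fun b i => b || p i) br = (br || xs.any p) := by
  induction xs generalizing br with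
  | nil => simp
  | cons x xs ih => simp [List.foldl_cons, ih, Bool.or_assoc]

theorem estBrelan_spec : Claim_equal_estBrelan := by
  intro l _ hpre
  unfold Pre_estBrelan at hpre
  obtain ⟨a, l, rfl⟩ : ∃ a l', l = a :: l' := by
    cases l with | nil => simp at hpre | cons a l => exact ⟨a, l, rfl⟩
  obtain ⟨b, l, rfl⟩ : ∃ b l', l = b :: l' := by
    cases l with | nil => simp at hpre | cons b l => exact ⟨b, l, rfl⟩
  obtain ⟨c, l, rfl⟩ : ∃ c l', l = c :: l' := by
    cases l with | nil => simp at hpre | cons c l => exact ⟨c, l, rfl⟩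
  obtain ⟨d, l, rfl⟩ : ∃ d l', l = d :: l' := by
    cases l with | nil => simp at hpre | cons d l => exact ⟨d, l, rfl⟩
  obtain ⟨e, l, rfl⟩ : ∃ e l', l = e :: l' := by
    cases l with | nil => simp at hpre | cons e l => exact ⟨e, l, rfl⟩
  have g0 : PySem.List.pyGet? (a :: b :: c :: d :: e :: l) 0 = some a := by
    rw [show (0 : Int) = ((0 : Nat) : Int) from rfl, PySem.List.pyGet?_natCast]; simp
  have g1 : PySem.List.pyGet? (a :: b :: c :: d :: e :: l) 1 = some b := by
    rw [show (1 : Int) = ((1 : Nat) : Int) from rfl, PySem.List.pyGet?_natCast]; simp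
  have g2 : PySem.List.pyGet? (a :: b :: c :: d :: e :: l) 2 = some c := by
    rw [show (2 : Int) = ((2 : Nat) : Int) from rfl, PySem.List.pyGet?_natCast]; simp
  have g3 : PySem.List.pyGet? (a :: b :: c :: d :: e :: l) 3 = some d := by
    rw [show (3 : Int) = ((3 : Nat) : Int) from rfl, PySem.List.pyGet?_natCast]; simp
  have g4 : PySem.List.pyGet? (a :: b :: c :: d :: e :: l) 4 = some e := by
    rw [show (4 : Int) = ((4 : Nat) : Int) from rfl, PySem.List.pyGet?_natCast]; simp
  show estBrelan _ = estBrelan_alt _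
  have hA : estBrelan (a :: b :: c :: d :: e :: l)
      = [1, 2, 3, 4, 5, 6].any (fun i => decide (3 ≤ (([a, b, c, d, e].count i : Int)))) := by
    unfold estBrelan
    rw [show PySem.List.pyRange 1 7 1 = [1, 2, 3, 4, 5, 6] from rfl,
        show PySem.List.pyRange 0 5 1 = [0, 1, 2, 3, 4] from rfl]
    have hbridge : ∀ (i : Int) (st : Int × Bool),
        List.foldl
          (fun (st : Int × Bool) j =>
            if (PySem.List.pyGet? (a :: b :: c :: d :: e :: l) j).getD 0 == i then
              (st.1 + 1, if st.1 + 1 == 3 then true else st.2)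
            else st) st [0, 1, 2, 3, 4]
        = List.foldl
            (fun (st : Int × Bool) x =>
              if x == i then (st.1 + 1, if st.1 + 1 == 3 then true else st.2) else st)
            st [a, b, c, d, e] := by
      intro i st
      simp only [List.foldl_cons, List.foldl_nil, g0, g1, g2, g3, g4, Option.getD_some]
    simp only [hbridge, inner_scan, zero_add]
    have hd : ∀ cnt : Nat, (decide ((0:Int) < 3 ∧ 3 ≤ (cnt : Int)))
        = decide (3 ≤ ((cnt : Int))) := by
      intro cnt
      simp
    simp only [hd]
    rw [foldl_or_any]
    simp
  have hB : estBrelan_alt (a :: b :: c :: d :: e :: l)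
      = [1, 2, 3, 4, 5, 6].any (fun i => decide (3 ≤ (([a, b, c, d, e].count i : Int)))) := by
    unfold estBrelan_alt
    rw [show PySem.List.pyRange 1 7 1 = [1, 2, 3, 4, 5, 6] from rfl,
        show PySem.List.pyRange 0 5 1 = [0, 1, 2, 3, 4] from rfl]
    have hbridge :
        List.foldl
          (fun (d' : PySem.Dict Int Int) j =>
            let v := (PySem.List.pyGet? (a :: b :: c :: d :: e :: l) j).getD 0
            d'.insert v (d'.getD v 0 + 1)) PySem.Dict.empty [0, 1, 2, 3, 4]
        = List.foldl
            (fun (d' : PySem.Dict Int Int) x => d'.insert x (d'.getD x 0 + 1))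
            PySem.Dict.empty [a, b, c, d, e] := by
      simp only [List.foldl_cons, List.foldl_nil, g0, g1, g2, g3, g4, Option.getD_some]
    simp only [hbridge, PySem.Dict.foldl_insert_getD_add_one_eq_counter,
      PySem.Dict.getD_counter]
  rw [hA, hB]
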